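-- pv_equiv track=rewrite | github.com/suju297/monitor | scripts/policy_router.py | profile_tuning
-- ===== SOURCE A (Python) =====
-- def unique_plan(values: list[str]) -> list[str]:
--     deduped: list[str] = []
--     for value in values:
--         if value and value not in deduped:
--             deduped.append(value)
--     return deduped
--
-- def profile_tuning(plan: list[str], profile: str) -> list[str]:
--     if profile == "browser-first":
--         priority = [source for source in ["playwright", "command"] if source in plan]
--         return unique_plan(priority + plan)
--     if profile == "api-first":
--         priority = [
--             source
--             for source in ["greenhouse", "lever", "icims", "icms", "template"]
--             if source in plan
--         ]
--         return unique_plan(priority + plan)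
--     return plan
-- ===== SOURCE B (Python) =====
-- _PRIORITY = {
--     "browser-first": ["playwright", "command"],
--     "api-first": ["greenhouse", "lever", "icims", "icms", "template"],
-- }
--
-- def profile_tuning(plan: list[str], profile: str) -> list[str]:
--     fixed = _PRIORITY.get(profile)
--     if fixed is None:
--         return plan
--     seen = set()
--     deduped = []
--     for value in plan:
--         if value and value not in seen:
--             seen.add(value)
--             deduped.append(value)
--     head = [source for source in fixed if source in seen]
--     tail = [value for value in deduped if value not in fixed]
--     return head + tail
-- ===== Notes on version B (the rewrite author's own statement) =====
-- stated objective: alternative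
-- what changed: B replaces A's prepend-priority-then-globally-dedup with a single dedup pass over the plan using a seen-set, then builds the result as fixed-order priority sources present in the plan followed by the remaining deduped items.
import Mathlib
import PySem

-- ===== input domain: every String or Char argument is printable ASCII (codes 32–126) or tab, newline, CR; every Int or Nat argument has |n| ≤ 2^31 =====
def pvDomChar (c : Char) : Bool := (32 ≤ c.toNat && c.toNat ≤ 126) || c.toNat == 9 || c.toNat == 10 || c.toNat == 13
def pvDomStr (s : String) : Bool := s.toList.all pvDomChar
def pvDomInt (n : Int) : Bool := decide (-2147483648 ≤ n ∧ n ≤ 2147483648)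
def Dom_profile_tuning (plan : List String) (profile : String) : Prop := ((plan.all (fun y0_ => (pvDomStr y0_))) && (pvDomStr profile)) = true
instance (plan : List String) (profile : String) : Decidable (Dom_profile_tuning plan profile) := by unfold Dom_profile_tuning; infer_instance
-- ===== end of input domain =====

-- B dedups the plan ONCE and then partitions it around the fixed priority list (head: priority
-- sources present in the plan, tail: the rest), instead of A's prepend-then-global-dedup; objective: alternative decomposition.

-- ===== PORT A =====
def unique_plan (values : List String) : List String :=
  values.foldl (fun deduped value =>
    if value ≠ "" ∧ value ∉ deduped then deduped ++ [value] else deduped) []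

def profile_tuning (plan : List String) (profile : String) : List String :=
  if profile = "browser-first" then
    unique_plan ((["playwright", "command"].filter (fun source => source ∈ plan)) ++ plan)
  else if profile = "api-first" then
    unique_plan ((["greenhouse", "lever", "icims", "icms", "template"].filter
      (fun source => source ∈ plan)) ++ plan)
  else plan

-- ===== PORT B =====
def pvPriority : PySem.Dict String (List String) :=
  PySem.Dict.ofList [("browser-first", ["playwright", "command"]),
                     ("api-first", ["greenhouse", "lever", "icims", "icms", "template"])]

def profile_tuning_alt (plan : List String) (profile : String) : List String :=
  match PySem.Dict.get? pvPriority profile with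
  | none => plan
  | some fixed =>
    let st := plan.foldl
      (fun (st : PySem.Set String × List String) value =>
        if value ≠ "" ∧ value ∉ st.1 then (PySem.Set.add st.1 value, st.2 ++ [value]) else st)
      (PySem.Set.empty, [])
    let head := fixed.filter (fun source => source ∈ st.1)
    let tail := st.2.filter (fun value => value ∉ fixed)
    head ++ tail

-- ===== PRECONDITION & SPEC =====
def Spec_profile_tuning (plan : List String) (profile : String) (out : List String) : Prop := out = profile_tuning_alt plan profile
instance (plan : List String) (profile : String) (out : List String) : Decidable (Spec_profile_tuning plan profile out) := by unfold Spec_profile_tuning; infer_instance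

-- ===== CLAIM (what is proved, stated in full; the proofs are below) =====
def Claim_equal_profile_tuning : Prop := ∀ (plan : List String) (profile : String), Dom_profile_tuning plan profile → Spec_profile_tuning plan profile (profile_tuning plan profile)

-- ===== LEMMAS AND PROOFS =====

/-- Recursive characterisation of the ordered-dedup loop state: the elements appended when
folding over `xs` with visited accumulator `acc`. -/
def ded (acc : List String) : List String → List String
  | [] => []
  | x :: xs => if x ≠ "" ∧ x ∉ acc then x :: ded (acc ++ [x]) xs else ded acc xs

lemma foldA (xs : List String) : ∀ acc,
    xs.foldl (fun d v => if v ≠ "" ∧ v ∉ d then d ++ [v] else d) acc = acc ++ ded acc xs := by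
  induction xs with
  | nil => intro acc; simp [ded]
  | cons x xs ih =>
    intro acc
    by_cases h : x ≠ "" ∧ x ∉ acc
    · simp [ded, h, List.foldl_cons, ih]
    · simp [ded, h, List.foldl_cons, ih]

lemma mem_ded (xs : List String) : ∀ acc x, x ∈ ded acc xs ↔ x ∈ xs ∧ x ≠ "" ∧ x ∉ acc := by
  induction xs with
  | nil => intro acc x; simp [ded]
  | cons y ys ih =>
    intro acc x
    by_cases h : y ≠ "" ∧ y ∉ acc
    · simp only [ded, if_pos h, List.mem_cons, ih]
      constructor
      · rintro (rfl | ⟨hx, hne, hnacc⟩)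
        · exact ⟨Or.inl rfl, h.1, h.2⟩
        · exact ⟨Or.inr hx, hne, fun hc => hnacc (List.mem_append_left _ hc)⟩
      · rintro ⟨hy | hx, hne, hnacc⟩
        · exact Or.inl hy
        · by_cases hxy : x = y
          · exact Or.inl hxy
          · exact Or.inr ⟨hx, hne, by simp [hxy, hnacc]⟩
    · simp only [ded, if_neg h, ih, List.mem_cons]
      constructor
      · rintro ⟨hx, hne, hnacc⟩; exact ⟨Or.inr hx, hne, hnacc⟩
      · rintro ⟨hy | hx, hne, hnacc⟩
        · subst hy
          exfalso; exact h ⟨hne, hnacc⟩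
        · exact ⟨hx, hne, hnacc⟩

lemma ded_append_prio (p : List String) : ∀ (plan acc : List String), p.Nodup →
    (∀ x ∈ p, x ≠ "" ∧ x ∉ acc) → ded acc (p ++ plan) = p ++ ded (acc ++ p) plan := by
  induction p with
  | nil => intro plan acc _ _; simp
  | cons x p ih =>
    intro plan acc hnd hx
    have h1 := hx x (by simp)
    have : ded acc (x :: (p ++ plan)) = x :: ded (acc ++ [x]) (p ++ plan) := by
      simp [ded, h1.1, h1.2]
    rw [List.cons_append, this, ih plan (acc ++ [x]) hnd.of_cons]
    · simp
    · intro y hy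
      refine ⟨(hx y (by simp [hy])).1, ?_⟩
      have hyx : y ≠ x := fun h => (List.nodup_cons.mp hnd).1 (h ▸ hy)
      simp [hyx, (hx y (by simp [hy])).2]

lemma ded_filter_key (fixedL : List String) (xs : List String) : ∀ acc₁ acc₂,
    (∀ y ∈ xs, (y ∈ acc₁ ↔ y ∈ fixedL ∨ y ∈ acc₂)) →
    ded acc₁ xs = (ded acc₂ xs).filter (fun v => v ∉ fixedL) := by
  induction xs with
  | nil => intro _ _ _; simp [ded]
  | cons x xs ih =>
    intro acc₁ acc₂ h
    have hx := h x (by simp)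
    by_cases hne : x = ""
    · subst hne
      simp only [ded, ne_eq, not_true_eq_false, false_and, if_false]
      exact ih acc₁ acc₂ (fun y hy => h y (by simp [hy]))
    · by_cases hx1 : x ∈ acc₁
      · have := hx.mp hx1
        by_cases hx2 : x ∈ acc₂
        · simp only [ded, hne, hx1, hx2, not_true_eq_false, and_false, if_false,
            ne_eq, not_false_eq_true]
          exact ih acc₁ acc₂ (fun y hy => h y (by simp [hy]))
        · have hxf : x ∈ fixedL := this.resolve_right hx2
          have lhs : ded acc₁ (x :: xs) = ded acc₁ xs := by
            simp [ded, hx1]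
          have rhs : ded acc₂ (x :: xs) = x :: ded (acc₂ ++ [x]) xs := by
            simp [ded, hne, hx2]
          rw [lhs, rhs, List.filter_cons]
          simp only [hxf, not_true_eq_false, decide_false]
          exact ih acc₁ (acc₂ ++ [x]) (by
            intro y hy
            rw [h y (by simp [hy])]
            constructor
            · rintro (hf | ha)
              · exact Or.inl hf
              · exact Or.inr (List.mem_append_left _ ha)
            · rintro (hf | ha)
              · exact Or.inl hf
              · rcases List.mem_append.mp ha with ha | ha
                · exact Or.inr ha
                · simp only [List.mem_singleton] at ha
                  exact Or.inl (ha ▸ hxf))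
      · have hnf : x ∉ fixedL ∧ x ∉ acc₂ := by
          constructor
          · intro hc; exact hx1 (hx.mpr (Or.inl hc))
          · intro hc; exact hx1 (hx.mpr (Or.inr hc))
        have lhs : ded acc₁ (x :: xs) = x :: ded (acc₁ ++ [x]) xs := by
          simp [ded, hne, hx1]
        have rhs : ded acc₂ (x :: xs) = x :: ded (acc₂ ++ [x]) xs := by
          simp [ded, hne, hnf.2]
        rw [lhs, rhs, List.filter_cons]
        simp only [hnf.1, not_false_eq_true, decide_true]
        exact congrArg (List.cons x) (ih (acc₁ ++ [x]) (acc₂ ++ [x]) (by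
          intro y hy
          simp only [List.mem_append, List.mem_singleton]
          rw [h y (by simp [hy])]
          tauto))

/-- B's fold keeps `seen` in sync with `deduped` and builds exactly `ded`. -/
lemma foldB (xs : List String) : ∀ (s : PySem.Set String) (d : List String),
    (∀ x, x ∈ s ↔ x ∈ d) →
    (xs.foldl
      (fun (st : PySem.Set String × List String) value =>
        if value ≠ "" ∧ value ∉ st.1 then (PySem.Set.add st.1 value, st.2 ++ [value]) else st)
      (s, d)).2 = d ++ ded d xs ∧
    (∀ x, x ∈ (xs.foldl
      (fun (st : PySem.Set String × List String) value =>
        if value ≠ "" ∧ value ∉ st.1 then (PySem.Set.add st.1 value, st.2 ++ [value]) else st)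
      (s, d)).1 ↔ x ∈ (xs.foldl
      (fun (st : PySem.Set String × List String) value =>
        if value ≠ "" ∧ value ∉ st.1 then (PySem.Set.add st.1 value, st.2 ++ [value]) else st)
      (s, d)).2) := by
  induction xs with
  | nil => intro s d h; exact ⟨by simp [ded], by simpa [ded] using h⟩
  | cons x xs ih =>
    intro s d h
    by_cases hc : x ≠ "" ∧ x ∉ s
    · have hd : x ∉ d := fun hx => hc.2 ((h x).mpr hx)
      have hstep : ded d (x :: xs) = x :: ded (d ++ [x]) xs := by simp [ded, hc.1, hd]
      have hs' : ∀ y, y ∈ PySem.Set.add s x ↔ y ∈ d ++ [x] := by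
        intro y
        rw [PySem.Set.mem_add]
        simp [h y]
      have := ih (PySem.Set.add s x) (d ++ [x]) hs'
      simp only [List.foldl_cons, if_pos hc]
      refine ⟨?_, this.2⟩
      rw [this.1, hstep]
      simp
    · have hd : ¬ (x ≠ "" ∧ x ∉ d) := by
        intro hx
        exact hc ⟨hx.1, fun hs => hx.2 ((h x).mp hs)⟩
      have hstep : ded d (x :: xs) = ded d xs := by simp [ded]; tauto
      simp only [List.foldl_cons, if_neg hc]
      have := ih s d h
      exact ⟨by rw [this.1, hstep], this.2⟩

/-- Both branch bodies agree, for any fixed priority list of nonempty distinct sources. -/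
lemma branch_eq (fixedL plan : List String) (hnd : fixedL.Nodup)
    (hne : ∀ x ∈ fixedL, x ≠ "") :
    unique_plan ((fixedL.filter (fun source => source ∈ plan)) ++ plan) =
    (let st := plan.foldl
        (fun (st : PySem.Set String × List String) value =>
          if value ≠ "" ∧ value ∉ st.1 then (PySem.Set.add st.1 value, st.2 ++ [value]) else st)
        (PySem.Set.empty, [])
      let head := fixedL.filter (fun source => source ∈ st.1)
      let tail := st.2.filter (fun value => value ∉ fixedL)
      head ++ tail) := by
  have hB := foldB plan PySem.Set.empty [] (by intro x; simp [PySem.Set.empty])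
  set st := plan.foldl
      (fun (st : PySem.Set String × List String) value =>
        if value ≠ "" ∧ value ∉ st.1 then (PySem.Set.add st.1 value, st.2 ++ [value]) else st)
      (PySem.Set.empty, []) with hst
  have hd2 : st.2 = ded [] plan := by simpa using hB.1
  set prio := fixedL.filter (fun source => source ∈ plan) with hprio
  have hprio_mem : ∀ y, y ∈ prio ↔ y ∈ fixedL ∧ y ∈ plan := by
    intro y; simp [hprio]
  -- LHS
  have hlhs : unique_plan (prio ++ plan) = prio ++ ded prio plan := by
    rw [unique_plan, foldA, List.nil_append,
      ded_append_prio prio plan [] (hnd.filter _)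
        (fun x hx => ⟨hne x ((hprio_mem x).mp hx).1, by simp⟩), List.nil_append]
  -- head = prio
  have hhead : fixedL.filter (fun source => source ∈ st.1) = prio := by
    rw [hprio]
    apply List.filter_congr
    intro s hs
    have : s ∈ st.1 ↔ s ∈ ded [] plan := by rw [hB.2 s, hd2]
    rw [mem_ded] at this
    simp only [decide_eq_decide, this]
    constructor
    · rintro ⟨hp, _, _⟩; exact hp
    · intro hp; exact ⟨hp, hne s hs, by simp⟩
  -- tail = ded prio plan
  have htail : st.2.filter (fun value => value ∉ fixedL) = ded prio plan := by
    rw [hd2]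
    refine (ded_filter_key fixedL plan prio [] ?_).symm
    intro y hy
    simp [hprio_mem y, hy]
  simp only []
  rw [hhead, htail, hlhs]

lemma get_pvPriority (profile : String) :
    PySem.Dict.get? pvPriority profile =
      if profile = "browser-first" then some ["playwright", "command"]
      else if profile = "api-first" then some ["greenhouse", "lever", "icims", "icms", "template"]
      else none := by
  have : pvPriority = PySem.Dict.mk
      [("browser-first", ["playwright", "command"]),
       ("api-first", ["greenhouse", "lever", "icims", "icms", "template"])] := by rfl
  rw [this, PySem.Dict.get?_mk_cons, PySem.Dict.get?_mk_cons]
  simp only [beq_iff_eq]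
  by_cases h1 : profile = "browser-first"
  · simp [h1]
  · by_cases h2 : profile = "api-first"
    · rw [if_neg (fun h => h1 h.symm), if_pos h2.symm, if_neg h1, if_pos h2]
    · rw [if_neg (fun h => h1 h.symm), if_neg (fun h => h2 h.symm), if_neg h1, if_neg h2]
      rfl

-- ===== VERDICT (by name: the statement is the Claim_ definition above) =====
theorem profile_tuning_spec : Claim_equal_profile_tuning := by
  intro plan profile _
  unfold Spec_profile_tuning profile_tuning profile_tuning_alt
  rw [get_pvPriority]
  by_cases h1 : profile = "browser-first"
  · simp only [h1, if_true]
    exact branch_eq ["playwright", "command"] plan (by decide) (by decide)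
  · by_cases h2 : profile = "api-first"
    · rw [if_neg h1, if_pos h2, if_neg h1, if_pos h2]
      exact branch_eq ["greenhouse", "lever", "icims", "icms", "template"] plan
        (by decide) (by decide)
    · simp [h1, h2]
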